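-- pv_equiv track=rewrite | github.com/faxrij/CENG133_LAB | lab8/example5.py | get_password_level
-- ===== SOURCE A (Python) =====
-- def get_password_level(pw):
--   letters = 0
--   spec_char = 0
--   number = 0
--   level = 0
--   if len(pw) < 8 or " " in pw:
--       return(level)
--   for char in pw:
--     if char.isalpha():
--       letters += 1
--     elif char.isnumeric():
--       number += 1
--     else:
--       spec_char += 1
--   if letters != 0:
--     level += 1
--   if number != 0:
--     level += 1
--   if spec_char != 0:
--     level += 1
--   return(level)
-- ===== SOURCE B (Python) =====
-- def get_password_level(pw):
--     if len(pw) < 8 or " " in pw: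
--         return 0
--     level = 0
--     if any(c.isalpha() for c in pw):
--         level += 1
--     if any((not c.isalpha()) and c.isnumeric() for c in pw):
--         level += 1
--     if any((not c.isalpha()) and (not c.isnumeric()) for c in pw):
--         level += 1
--     return level
-- ===== Notes on version B (the rewrite author's own statement) =====
-- stated objective: simpler
-- what changed: Replaces the three running category counters and final nonzero tests by three independent short-circuiting any() scans (guarded to preserve the alpha>numeric>other branch precedence), with the same early guard.
import Mathlib
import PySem

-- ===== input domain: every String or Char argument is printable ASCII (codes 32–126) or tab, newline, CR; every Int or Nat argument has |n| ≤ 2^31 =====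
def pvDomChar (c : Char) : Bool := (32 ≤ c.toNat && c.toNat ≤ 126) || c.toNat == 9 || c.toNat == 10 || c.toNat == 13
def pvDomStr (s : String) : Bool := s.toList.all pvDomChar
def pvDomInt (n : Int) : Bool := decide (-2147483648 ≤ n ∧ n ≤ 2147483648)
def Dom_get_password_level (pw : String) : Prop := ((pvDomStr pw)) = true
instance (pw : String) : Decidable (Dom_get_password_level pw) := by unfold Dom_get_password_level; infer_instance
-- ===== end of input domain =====

-- B replaces A's running category counters + final nonzero tests by three independent any-scans (simpler decomposition; return value only).


-- ===== PORT A =====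
-- isnumeric ported as PySem.Chars.isdigit: exact on the ASCII domain; " " in pw for a one-char needle is exactly membership of ' '.
def get_password_level (pw : String) : Int :=
  let letters : Int := 0
  let spec_char : Int := 0
  let number : Int := 0
  let level : Int := 0
  if PySem.Str.len pw < 8 || pw.toList.contains ' ' then level
  else
    let st := pw.toList.foldl
      (fun (acc : Int × Int × Int) c =>
        if PySem.Chars.isalpha c then (acc.1 + 1, acc.2.1, acc.2.2)
        else if PySem.Chars.isdigit c then (acc.1, acc.2.1 + 1, acc.2.2)
        else (acc.1, acc.2.1, acc.2.2 + 1))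
      (letters, number, spec_char)
    let level := if st.1 ≠ 0 then level + 1 else level
    let level := if st.2.1 ≠ 0 then level + 1 else level
    let level := if st.2.2 ≠ 0 then level + 1 else level
    level

-- ===== PORT B =====
def get_password_level_alt (pw : String) : Int :=
  if PySem.Str.len pw < 8 || pw.toList.contains ' ' then 0
  else
    (if pw.toList.any (fun c => PySem.Chars.isalpha c) then 1 else 0)
    + (if pw.toList.any (fun c => !PySem.Chars.isalpha c && PySem.Chars.isdigit c) then 1 else 0)
    + (if pw.toList.any (fun c => !PySem.Chars.isalpha c && !PySem.Chars.isdigit c) then 1 else 0)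

-- ===== PRECONDITION & SPEC =====
def Spec_get_password_level (pw : String) (out : Int) : Prop := out = get_password_level_alt pw
instance (pw : String) (out : Int) : Decidable (Spec_get_password_level pw out) := by unfold Spec_get_password_level; infer_instance

-- ===== CLAIM (what is proved, stated in full; the proofs are below) =====
def Claim_equal_get_password_level : Prop := ∀ (pw : String), Dom_get_password_level pw → Spec_get_password_level pw (get_password_level pw)

-- ===== LEMMAS AND PROOFS =====

theorem pv_foldl_counts (l : List Char) (a b c : Int) :
    l.foldl
      (fun (acc : Int × Int × Int) ch =>
        if PySem.Chars.isalpha ch then (acc.1 + 1, acc.2.1, acc.2.2)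
        else if PySem.Chars.isdigit ch then (acc.1, acc.2.1 + 1, acc.2.2)
        else (acc.1, acc.2.1, acc.2.2 + 1))
      (a, b, c)
    = (a + (l.countP (fun ch => PySem.Chars.isalpha ch) : Int),
       b + (l.countP (fun ch => !PySem.Chars.isalpha ch && PySem.Chars.isdigit ch) : Int),
       c + (l.countP (fun ch => !PySem.Chars.isalpha ch && !PySem.Chars.isdigit ch) : Int)) := by
  induction l generalizing a b c with
  | nil => simp
  | cons h t ih =>
    by_cases ha : PySem.Chars.isalpha h
    · simp [List.countP_cons, ha, ih]; omega
    · by_cases hd : PySem.Chars.isdigit h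
      · simp [List.countP_cons, ha, hd, ih]; omega
      · simp [List.countP_cons, ha, hd, ih]; omega

theorem pv_any_countP (l : List Char) (p : Char → Bool) :
    (l.any p = true) ↔ (0 : Int) < (l.countP p : Int) := by
  have h : (l.any p = true) ↔ 0 < l.countP p := by
    rw [List.any_eq_true, List.countP_pos_iff]
  rw [h]
  exact_mod_cast Iff.rfl

-- ===== VERDICT (by name: the statement is the Claim_ definition above) =====
theorem get_password_level_spec : Claim_equal_get_password_level := by
  intro pw _
  unfold Spec_get_password_level get_password_level get_password_level_alt
  by_cases hg : PySem.Str.len pw < 8 || pw.toList.contains ' '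
  · have hp : PySem.Str.len pw < 8 ∨ ' ' ∈ pw.toList := by
      rcases (Bool.or_eq_true _ _).mp hg with h | h
      · exact Or.inl (by exact_mod_cast of_decide_eq_true h)
      · exact Or.inr (List.mem_of_elem_eq_true h)
    have hp2 : pw.length < 8 ∨ ' ' ∈ pw.toList := by
      rcases hp with h | h
      · exact Or.inl (by exact_mod_cast (by simpa [PySem.Str.len] using h : (pw.length : Int) < 8))
      · exact Or.inr h
    simp [hp2, PySem.Str.len]
  · simp only [hg, if_false, Bool.false_eq_true]
    rw [pv_foldl_counts]
    have h1 := pv_any_countP pw.toList (fun c => PySem.Chars.isalpha c)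
    have h2 := pv_any_countP pw.toList (fun c => !PySem.Chars.isalpha c && PySem.Chars.isdigit c)
    have h3 := pv_any_countP pw.toList (fun c => !PySem.Chars.isalpha c && !PySem.Chars.isdigit c)
    simp only [h1, h2, h3, zero_add]
    split_ifs <;> omega
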